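-- pv_equiv track=rewrite | github.com/vttc08/demucs-karaoke-app | services/youtube_service.py | _stagger_and_dedupe
-- ===== SOURCE A (Python) =====
-- from typing import List
--
-- def _stagger_and_dedupe(base_results: List[dict], karaoke_results: List[dict]) -> List[dict]:
--     """Interleave base/karaoke lists and dedupe by video_id preserving order."""
--     merged: List[dict] = []
--     max_len = max(len(base_results), len(karaoke_results))
--     for index in range(max_len):
--         if index < len(base_results):
--             merged.append(base_results[index])
--         if index < len(karaoke_results):
--             merged.append(karaoke_results[index])
--
--     deduped: List[dict] = []
--     seen_video_ids = set()
--     for item in merged: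
--         video_id = item.get("video_id")
--         if video_id and video_id in seen_video_ids:
--             continue
--         if video_id:
--             seen_video_ids.add(video_id)
--         deduped.append(item)
--     return deduped
-- ===== SOURCE B (Python) =====
-- from typing import List
--
-- def _stagger_and_dedupe(base_results: List[dict], karaoke_results: List[dict]) -> List[dict]:
--     """Zip-merge the two lists (plus the leftover tail), then keep each item whose
--     video_id is falsy or whose position is the first occurrence of that id."""
--     merged: List[dict] = []
--     for pair in zip(base_results, karaoke_results):
--         merged.extend(pair)
--     n = min(len(base_results), len(karaoke_results))
--     merged += base_results[n:] + karaoke_results[n:]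
--
--     first_pos = {}
--     for pos, item in enumerate(merged):
--         vid = item.get("video_id")
--         if vid and vid not in first_pos:
--             first_pos[vid] = pos
--     return [item for pos, item in enumerate(merged)
--             if not item.get("video_id") or first_pos[item.get("video_id")] == pos]
-- ===== Notes on version B (the rewrite author's own statement) =====
-- stated objective: alternative
-- what changed: B replaces A's index-range interleave and online seen-set dedupe loop with a zip-based merge (zipped pairs plus the leftover tail slice) followed by a precomputed first-occurrence-position map and a filter comprehension that keeps an item iff its video_id is falsy or its position is that id's first occurrence.
import Mathlib
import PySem

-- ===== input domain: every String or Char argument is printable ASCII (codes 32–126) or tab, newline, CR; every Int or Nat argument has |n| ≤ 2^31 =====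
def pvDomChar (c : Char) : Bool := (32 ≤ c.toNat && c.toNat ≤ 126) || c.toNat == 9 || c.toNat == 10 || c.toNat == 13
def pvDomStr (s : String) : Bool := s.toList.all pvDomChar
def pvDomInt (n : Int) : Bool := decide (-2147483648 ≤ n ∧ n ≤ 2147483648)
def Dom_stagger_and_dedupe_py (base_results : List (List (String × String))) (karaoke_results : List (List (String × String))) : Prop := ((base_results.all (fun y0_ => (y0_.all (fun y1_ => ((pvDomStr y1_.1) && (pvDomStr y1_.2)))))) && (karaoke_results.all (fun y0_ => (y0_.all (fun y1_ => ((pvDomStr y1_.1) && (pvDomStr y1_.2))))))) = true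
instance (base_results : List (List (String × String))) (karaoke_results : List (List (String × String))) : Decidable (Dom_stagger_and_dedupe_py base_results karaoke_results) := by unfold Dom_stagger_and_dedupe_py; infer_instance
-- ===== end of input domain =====

-- B merges by zip + leftover tail and dedupes by a precomputed first-occurrence-position map
-- instead of A's index-range interleave and online seen-set loop (objective: alternative).
-- Neither program mutates its arguments; equivalence is about the return value.

-- item.get("video_id"); an item dict is an association list, lookup = first match
def getVid (item : List (String × String)) : Option String :=
  List.lookup "video_id" item

-- ===== PORT A =====
-- body of A's dedupe loop: state = (deduped list, seen_video_ids set)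
def dedupeStep (st : List (List (String × String)) × PySem.Set String)
    (item : List (String × String)) : List (List (String × String)) × PySem.Set String :=
  match getVid item with
  | none => (st.1 ++ [item], st.2)
  | some v =>
    if v ≠ "" then
      if PySem.Set.contains st.2 v then st
      else (st.1 ++ [item], PySem.Set.add st.2 v)
    else (st.1 ++ [item], st.2)

def stagger_and_dedupe_py (base_results : List (List (String × String))) (karaoke_results : List (List (String × String))) : List (List (String × String)) :=
  let max_len : Int := max (base_results.length : Int) (karaoke_results.length : Int)
  let merged : List (List (String × String)) :=
    (PySem.List.pyRange 0 max_len 1).foldl (fun merged index =>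
      let merged := if index < (base_results.length : Int)
        then merged ++ [PySem.List.pyGetD base_results index []] else merged
      if index < (karaoke_results.length : Int)
        then merged ++ [PySem.List.pyGetD karaoke_results index []] else merged) []
  (merged.foldl dedupeStep ([], PySem.Set.empty)).1

-- ===== PORT B =====
-- body of B's first_pos-building loop ('if vid and vid not in first_pos: first_pos[vid] = pos')
def firstStep (d : PySem.Dict String Int) (pi : Int × List (String × String)) : PySem.Dict String Int :=
  match getVid pi.2 with
  | none => d
  | some v => if v ≠ "" ∧ d.contains v = false then d.insert v pi.1 else d

-- the comprehension's condition 'not item.get("video_id") or first_pos[item.get("video_id")] == pos'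
def keepPred (first : PySem.Dict String Int) (pi : Int × List (String × String)) : Bool :=
  match getVid pi.2 with
  | none => true
  | some v => decide (v = "") || (first.get? v == some pi.1)

def stagger_and_dedupe_py_alt (base_results : List (List (String × String))) (karaoke_results : List (List (String × String))) : List (List (String × String)) :=
  let merged : List (List (String × String)) :=
    (base_results.zip karaoke_results).foldl (fun acc p => (acc ++ [p.1]) ++ [p.2]) []
  let n : Int := min (base_results.length : Int) (karaoke_results.length : Int)
  let merged := merged ++
    (PySem.List.slice base_results (some n) none ++ PySem.List.slice karaoke_results (some n) none)
  let first_pos := (PySem.List.enumerate merged 0).foldl firstStep PySem.Dict.empty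
  ((PySem.List.enumerate merged 0).filter (keepPred first_pos)).map (·.2)

-- ===== PRECONDITION & SPEC =====
def Spec_stagger_and_dedupe_py (base_results : List (List (String × String))) (karaoke_results : List (List (String × String))) (out : List (List (String × String))) : Prop := out = stagger_and_dedupe_py_alt base_results karaoke_results
instance (base_results : List (List (String × String))) (karaoke_results : List (List (String × String))) (out : List (List (String × String))) : Decidable (Spec_stagger_and_dedupe_py base_results karaoke_results out) := by unfold Spec_stagger_and_dedupe_py; infer_instance

-- ===== CLAIM (what is proved, stated in full; the proofs are below) =====
def Claim_equal_stagger_and_dedupe_py : Prop := ∀ (base_results : List (List (String × String))) (karaoke_results : List (List (String × String))), Dom_stagger_and_dedupe_py base_results karaoke_results → Spec_stagger_and_dedupe_py base_results karaoke_results (stagger_and_dedupe_py base_results karaoke_results)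

-- ===== LEMMAS AND PROOFS =====

-- reference interleaving both merge phases are proved equal to
def mergeRec : List (List (String × String)) → List (List (String × String)) → List (List (String × String))
  | [], k => k
  | x :: bs, [] => x :: bs
  | x :: bs, y :: ks => x :: y :: mergeRec bs ks

-- the truthy video_id of an item (none if absent or "")
def tvid (item : List (String × String)) : Option String :=
  match getVid item with
  | none => none
  | some v => if v = "" then none else some v

-- reference dedupe: recursive form of A's loop, which B's first-occurrence filter also matches
def dedupeRec (seen : PySem.Set String) : List (List (String × String)) → List (List (String × String))
  | [] => []
  | x :: xs =>
    match getVid x with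
    | none => x :: dedupeRec seen xs
    | some v =>
      if v ≠ "" then
        if PySem.Set.contains seen v then dedupeRec seen xs
        else x :: dedupeRec (PySem.Set.add seen v) xs
      else x :: dedupeRec seen xs

-- index of the first item whose truthy video_id is v
def fIdx (v : String) : List (List (String × String)) → Option Nat
  | [] => none
  | x :: xs => if tvid x = some v then some 0 else (fIdx v xs).map (· + 1)

theorem range_getD_eq {α : Type} (l : List α) (d : α) :
    (List.range l.length).map (fun j => l.getD j d) = l := by
  apply List.ext_getElem
  · simp
  · intro i h1 h2
    simp [List.getD_eq_getElem?_getD, List.getElem?_eq_getElem h2]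

theorem foldl_range_merge (b : List (List (String × String))) :
    ∀ (k : List (List (String × String))) (acc : List (List (String × String))),
    (List.range (max b.length k.length)).foldl
      (fun acc (j : Nat) =>
        let m1 := if ((j:Int)) < (b.length : Int) then acc ++ [b.getD j []] else acc
        if ((j:Int)) < (k.length : Int) then m1 ++ [k.getD j []] else m1) acc
    = acc ++ mergeRec b k := by
  induction b with
  | nil =>
    intro k acc
    simp only [List.length_nil, Nat.max_eq_right (Nat.zero_le _), mergeRec]
    rw [PySem.List.foldl_congr_mem _ _ (fun acc j => acc ++ [k.getD j []]) acc ?_]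
    · rw [PySem.List.foldl_append_singleton_eq_map, range_getD_eq]
    · intro acc j hj
      simp only [List.mem_range] at hj
      split_ifs <;> first | rfl | (exfalso; omega)
  | cons x bs ih =>
    intro k acc
    cases k with
    | nil =>
      simp only [List.length_nil, Nat.max_eq_left (Nat.zero_le _), mergeRec]
      rw [PySem.List.foldl_congr_mem _ _ (fun acc j => acc ++ [(x :: bs).getD j []]) acc ?_]
      · rw [PySem.List.foldl_append_singleton_eq_map, range_getD_eq]
      · intro acc j hj
        simp only [List.mem_range, List.length_cons] at hj ⊢
        split_ifs <;> first | rfl | (exfalso; omega)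
    | cons y ks =>
      have hmax : max (x :: bs).length (y :: ks).length = (max bs.length ks.length) + 1 := by
        simp [Nat.succ_max_succ]
      rw [hmax, List.range_succ_eq_map, List.foldl_cons, List.foldl_map]
      have h0b : ((0:Nat):Int) < ((x :: bs).length : Int) := by push_cast [List.length_cons]; omega
      have h0k : ((0:Nat):Int) < ((y :: ks).length : Int) := by push_cast [List.length_cons]; omega
      rw [if_pos h0b, if_pos h0k, List.getD_cons_zero, List.getD_cons_zero]
      rw [PySem.List.foldl_congr_mem _ _
        (fun acc (j : Nat) =>
          let m1 := if ((j:Int)) < (bs.length : Int) then acc ++ [bs.getD j []] else acc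
          if ((j:Int)) < (ks.length : Int) then m1 ++ [ks.getD j []] else m1) _ ?_]
      · rw [ih ks ((acc ++ [x]) ++ [y])]
        simp [mergeRec]
      · intro acc j _
        simp only [Nat.succ_eq_add_one, List.getD_cons_succ, List.length_cons]
        split_ifs <;> first | rfl | (exfalso; push_cast at *; omega)

theorem mergedA_eq (b k : List (List (String × String))) :
    (PySem.List.pyRange 0 (max (b.length : Int) (k.length : Int)) 1).foldl (fun merged index =>
      let merged := if index < (b.length : Int)
        then merged ++ [PySem.List.pyGetD b index []] else merged
      if index < (k.length : Int)
        then merged ++ [PySem.List.pyGetD k index []] else merged) []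
    = mergeRec b k := by
  rw [← Nat.cast_max, PySem.List.pyRange_zero_natCast, List.foldl_map]
  have := foldl_range_merge b k []
  simp only [List.nil_append] at this
  rw [← this]
  apply PySem.List.foldl_congr_mem
  intro acc j _
  simp only [PySem.List.pyGetD_natCast]

theorem mergedB_eq (b k : List (List (String × String))) :
    ((b.zip k).foldl (fun acc p => (acc ++ [p.1]) ++ [p.2]) []) ++
      (PySem.List.slice b (some (min (b.length : Int) (k.length : Int))) none ++
       PySem.List.slice k (some (min (b.length : Int) (k.length : Int))) none)
    = mergeRec b k := by
  rw [← Nat.cast_min, PySem.List.slice_from_natCast, PySem.List.slice_from_natCast]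
  have main : ∀ (b k acc : List (List (String × String))),
      ((b.zip k).foldl (fun acc p => (acc ++ [p.1]) ++ [p.2]) acc) ++
        (b.drop (min b.length k.length) ++ k.drop (min b.length k.length))
      = acc ++ mergeRec b k := by
    intro b
    induction b with
    | nil => intro k acc; simp [mergeRec]
    | cons x bs ih =>
      intro k acc
      cases k with
      | nil => simp [mergeRec]
      | cons y ks =>
        simp only [List.zip_cons_cons, List.foldl_cons, List.length_cons,
          Nat.succ_min_succ, List.drop_succ_cons, mergeRec]
        rw [ih ks ((acc ++ [x]) ++ [y])]
        simp
  exact main b k []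

theorem foldl_dedupeStep (m : List (List (String × String))) :
    ∀ (acc : List (List (String × String))) (seen : PySem.Set String),
      (m.foldl dedupeStep (acc, seen)).1 = acc ++ dedupeRec seen m := by
  induction m with
  | nil => intro acc seen; simp [dedupeRec]
  | cons x xs ih =>
    intro acc seen
    simp only [List.foldl_cons, dedupeRec]
    cases h : getVid x with
    | none => simp [dedupeStep, h, ih]
    | some v =>
      by_cases hv : v = ""
      · simp [dedupeStep, h, hv, ih]
      · by_cases hc : v ∈ seen
        · simp [dedupeStep, h, hv, hc, ih]
        · simp [dedupeStep, h, hv, hc, ih]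

theorem first_get? (v : String) (m : List (List (String × String))) :
    ∀ (s : Nat) (d : PySem.Dict String Int),
      ((PySem.List.enumerate m (s : Int)).foldl firstStep d).get? v =
        match d.get? v with
        | some q => some q
        | none => (fIdx v m).map (fun n => ((s + n : Nat) : Int)) := by
  induction m with
  | nil =>
    intro s d
    rw [PySem.List.enumerate_nil]
    simp only [List.foldl_nil, fIdx]
    cases d.get? v <;> simp
  | cons x xs ih =>
    intro s d
    rw [PySem.List.enumerate_cons]
    simp only [List.foldl_cons]
    have hs1 : ((s : Int) + 1) = (((s + 1 : Nat)) : Int) := by push_cast; ring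
    cases hx : getVid x with
    | none =>
      have hstep : firstStep d ((s : Int), x) = d := by simp [firstStep, hx]
      rw [hstep, hs1, ih (s + 1)]
      have hf : fIdx v (x :: xs) = (fIdx v xs).map (· + 1) := by simp [fIdx, tvid, hx]
      rw [hf]
      cases d.get? v with
      | some q => rfl
      | none => cases fIdx v xs <;> simp <;> push_cast <;> ring
    | some w =>
      by_cases hw : w = ""
      · have hstep : firstStep d ((s : Int), x) = d := by simp [firstStep, hx, hw]
        rw [hstep, hs1, ih (s + 1)]
        have hf : fIdx v (x :: xs) = (fIdx v xs).map (· + 1) := by simp [fIdx, tvid, hx, hw]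
        rw [hf]
        cases d.get? v with
        | some q => rfl
        | none => cases fIdx v xs <;> simp <;> push_cast <;> ring
      · have ht : tvid x = some w := by simp [tvid, hx, hw]
        by_cases hc : d.contains w = true
        · have hstep : firstStep d ((s : Int), x) = d := by simp [firstStep, hx, hc]
          rw [hstep, hs1, ih (s + 1)]
          cases hd : d.get? v with
          | some q => rfl
          | none =>
            have hvw : v ≠ w := by
              rintro rfl
              rw [PySem.Dict.contains_eq_isSome_get?, hd] at hc
              simp at hc
            have hf : fIdx v (x :: xs) = (fIdx v xs).map (· + 1) := by
              simp [fIdx, ht, Ne.symm hvw]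
            rw [hf]
            cases fIdx v xs <;> simp <;> push_cast <;> ring
        · have hc' : d.contains w = false := by simpa using hc
          have hstep : firstStep d ((s : Int), x) = d.insert w (s : Int) := by
            simp [firstStep, hx, hw, hc']
          rw [hstep, hs1, ih (s + 1)]
          by_cases hvw : v = w
          · subst hvw
            rw [PySem.Dict.get?_insert_self]
            have hd : d.get? v = none := by
              rw [PySem.Dict.contains_eq_isSome_get?] at hc'
              cases hdd : d.get? v <;> simp [hdd] at hc' ⊢
            rw [hd]
            have hf : fIdx v (x :: xs) = some 0 := by simp [fIdx, ht]
            rw [hf]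
            simp
          · rw [PySem.Dict.get?_insert_of_ne _ _ hvw]
            have hf : fIdx v (x :: xs) = (fIdx v xs).map (· + 1) := by
              simp [fIdx, ht, Ne.symm hvw]
            rw [hf]
            cases d.get? v with
            | some q => rfl
            | none => cases fIdx v xs <;> simp <;> push_cast <;> ring

theorem filter_keep_eq (F : PySem.Dict String Int) (t : List (List (String × String))) :
    ∀ (s : Nat) (seen : PySem.Set String),
      (∀ v, v ∈ seen → ∀ p : Int, F.get? v = some p → p < (s : Int)) →
      (∀ v, v ∉ seen → F.get? v = (fIdx v t).map (fun n => ((s + n : Nat) : Int))) →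
      ((PySem.List.enumerate t (s : Int)).filter (keepPred F)).map (·.2) = dedupeRec seen t := by
  induction t with
  | nil => intro s seen _ _; rw [PySem.List.enumerate_nil]; simp [dedupeRec]
  | cons x xs ih =>
    intro s seen H1 H2
    rw [PySem.List.enumerate_cons, List.filter_cons]
    have hs1 : ((s : Int) + 1) = (((s + 1 : Nat)) : Int) := by push_cast; ring
    rw [hs1]
    cases hx : getVid x with
    | none =>
      have hk : keepPred F ((s : Int), x) = true := by simp [keepPred, hx]
      rw [hk]
      simp only [if_true, List.map_cons, dedupeRec, hx]
      rw [ih (s + 1) seen ?_ ?_]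
      · intro v hv p hp
        have := H1 v hv p hp
        push_cast; omega
      · intro v hv
        rw [H2 v hv]
        have hf : fIdx v (x :: xs) = (fIdx v xs).map (· + 1) := by simp [fIdx, tvid, hx]
        rw [hf]
        cases fIdx v xs <;> simp; push_cast; ring
    | some w =>
      by_cases hw : w = ""
      · have hk : keepPred F ((s : Int), x) = true := by simp [keepPred, hx, hw]
        rw [hk]
        simp only [if_true, List.map_cons, dedupeRec, hx, hw]
        simp only [ne_eq, not_true_eq_false, if_false]
        rw [ih (s + 1) seen ?_ ?_]
        · intro v hv p hp
          have := H1 v hv p hp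
          push_cast; omega
        · intro v hv
          rw [H2 v hv]
          have hf : fIdx v (x :: xs) = (fIdx v xs).map (· + 1) := by simp [fIdx, tvid, hx, hw]
          rw [hf]
          cases fIdx v xs <;> simp; push_cast; ring
      · have ht : tvid x = some w := by simp [tvid, hx, hw]
        by_cases hc : w ∈ seen
        · -- already seen: filtered out by A; keepPred false because F.get? w, if any, is < s
          have hk : keepPred F ((s : Int), x) = false := by
            simp only [keepPred, hx]
            cases hF : F.get? w with
            | none => simp [hw]
            | some p =>
              have := H1 w hc p hF
              simp [hw]
              omega
          rw [hk]
          simp only [Bool.false_eq_true, if_false, dedupeRec, hx, hw, ne_eq, not_false_eq_true,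
            if_true, (PySem.Set.contains_iff seen w).2 hc]
          rw [ih (s + 1) seen ?_ ?_]
          · intro v hv p hp
            have := H1 v hv p hp
            push_cast; omega
          · intro v hv
            have hvw : v ≠ w := fun h => hv (h ▸ hc)
            rw [H2 v hv]
            have hf : fIdx v (x :: xs) = (fIdx v xs).map (· + 1) := by
              simp [fIdx, ht, Ne.symm hvw]
            rw [hf]
            cases fIdx v xs <;> simp; push_cast; ring
        · -- first occurrence: kept; F.get? w = some s
          have hF : F.get? w = some (s : Int) := by
            rw [H2 w hc]
            have hf : fIdx w (x :: xs) = some 0 := by simp [fIdx, ht]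
            rw [hf]; simp
          have hk : keepPred F ((s : Int), x) = true := by simp [keepPred, hx, hF]
          rw [hk]
          have hcc : PySem.Set.contains seen w = false := by
            rw [Bool.eq_false_iff]
            intro h; exact hc ((PySem.Set.contains_iff seen w).1 h)
          simp only [if_true, List.map_cons, dedupeRec, hx, hw, ne_eq, not_false_eq_true,
            if_true, hcc, Bool.false_eq_true, if_false]
          rw [ih (s + 1) (PySem.Set.add seen w) ?_ ?_]
          · intro v hv p hp
            rcases (PySem.Set.mem_add seen w v).1 hv with h | rfl
            · have := H1 v h p hp
              push_cast; omega
            · rw [hF] at hp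
              cases hp
              push_cast; omega
          · intro v hv
            have hv1 : v ∉ seen := fun h => hv ((PySem.Set.mem_add seen w v).2 (Or.inl h))
            have hvw : v ≠ w := fun h => hv ((PySem.Set.mem_add seen w v).2 (Or.inr h))
            rw [H2 v hv1]
            have hf : fIdx v (x :: xs) = (fIdx v xs).map (· + 1) := by
              simp [fIdx, ht, Ne.symm hvw]
            rw [hf]
            cases fIdx v xs <;> simp; push_cast; ring

theorem portA_val (b k : List (List (String × String))) :
    stagger_and_dedupe_py b k = dedupeRec PySem.Set.empty (mergeRec b k) := by
  show (((PySem.List.pyRange 0 (max (b.length : Int) (k.length : Int)) 1).foldl (fun merged index =>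
      let merged := if index < (b.length : Int)
        then merged ++ [PySem.List.pyGetD b index []] else merged
      if index < (k.length : Int)
        then merged ++ [PySem.List.pyGetD k index []] else merged) []).foldl
      dedupeStep ([], PySem.Set.empty)).1 = _
  rw [mergedA_eq]
  simpa using foldl_dedupeStep (mergeRec b k) [] PySem.Set.empty

theorem portB_val (b k : List (List (String × String))) :
    stagger_and_dedupe_py_alt b k = dedupeRec PySem.Set.empty (mergeRec b k) := by
  show ((PySem.List.enumerate (((b.zip k).foldl (fun acc p => (acc ++ [p.1]) ++ [p.2]) []) ++
      (PySem.List.slice b (some (min (b.length : Int) (k.length : Int))) none ++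
       PySem.List.slice k (some (min (b.length : Int) (k.length : Int))) none)) 0).filter
      (keepPred ((PySem.List.enumerate (((b.zip k).foldl (fun acc p => (acc ++ [p.1]) ++ [p.2]) []) ++
      (PySem.List.slice b (some (min (b.length : Int) (k.length : Int))) none ++
       PySem.List.slice k (some (min (b.length : Int) (k.length : Int))) none)) 0).foldl
        firstStep PySem.Dict.empty))).map (·.2) = _
  rw [mergedB_eq]
  have h := filter_keep_eq
    ((PySem.List.enumerate (mergeRec b k) 0).foldl firstStep PySem.Dict.empty)
    (mergeRec b k) 0 PySem.Set.empty ?_ ?_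
  · simpa using h
  · intro v hv p _
    exact absurd hv (by simp [PySem.Set.empty])
  · intro v _
    have h0 := first_get? v (mergeRec b k) 0 PySem.Dict.empty
    simpa [PySem.Dict.get?_empty] using h0

-- ===== VERDICT (by name: the statement is the Claim_ definition above) =====
theorem stagger_and_dedupe_py_spec : Claim_equal_stagger_and_dedupe_py := by
  intro b k _
  unfold Spec_stagger_and_dedupe_py
  rw [portA_val, portB_val]
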